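-- pv_equiv track=rewrite | github.com/aidenisaman/pyRacerzRevamped | modules/ai_track_model.py | _segment_connected
-- ===== SOURCE A (Python) =====
-- from collections import deque
--
-- def _segment_connected(mask, starts, goals):
--   if not starts or not goals or not mask:
--     return False
--
--   goal_set = set(goals)
--   q = deque([s for s in starts if s in mask])
--   if not q:
--     return False
--   seen = set(q)
--
--   while q:
--     cur = q.popleft()
--     if cur in goal_set:
--       return True
--     for nxt in ((cur[0] + 1, cur[1]), (cur[0] - 1, cur[1]), (cur[0], cur[1] + 1), (cur[0], cur[1] - 1)):
--       if nxt in mask and nxt not in seen: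
--         seen.add(nxt)
--         q.append(nxt)
--   return False
-- ===== SOURCE B (Python) =====
-- def _segment_connected(mask, starts, goals):
--     cells = set(mask)
--     reach = {s for s in starts if s in cells}
--     for _ in range(len(cells)):
--         reach |= {n for (x, y) in reach
--                     for n in ((x + 1, y), (x - 1, y), (x, y + 1), (x, y - 1))
--                     if n in cells}
--     return any(g in reach for g in goals)
-- ===== Notes on version B (the rewrite author's own statement) =====
-- stated objective: alternative
-- what changed: Replaces the deque BFS with per-neighbor list-membership tests and seen/queue bookkeeping by a bulk fixed-point saturation: the reachable region is grown in whole rounds of set unions over a precomputed cell set (at most |set(mask)| rounds) and the goals are checked against the final set.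
import Mathlib
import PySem

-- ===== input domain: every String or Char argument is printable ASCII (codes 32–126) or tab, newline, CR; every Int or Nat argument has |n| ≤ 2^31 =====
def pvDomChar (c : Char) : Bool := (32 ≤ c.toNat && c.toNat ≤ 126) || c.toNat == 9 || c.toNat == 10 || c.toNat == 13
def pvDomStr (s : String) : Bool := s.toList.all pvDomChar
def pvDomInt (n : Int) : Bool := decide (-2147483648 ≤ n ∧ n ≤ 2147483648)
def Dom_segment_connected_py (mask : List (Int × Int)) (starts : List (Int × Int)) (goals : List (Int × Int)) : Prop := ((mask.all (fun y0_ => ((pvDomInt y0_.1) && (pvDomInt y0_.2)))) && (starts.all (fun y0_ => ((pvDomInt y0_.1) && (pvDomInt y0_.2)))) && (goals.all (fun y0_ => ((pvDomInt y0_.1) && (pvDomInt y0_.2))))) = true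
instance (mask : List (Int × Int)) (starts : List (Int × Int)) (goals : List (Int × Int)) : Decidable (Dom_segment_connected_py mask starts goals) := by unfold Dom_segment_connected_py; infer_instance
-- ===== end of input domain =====

-- B replaces the deque BFS (with list-membership neighbor tests and seen/queue bookkeeping) by a
-- bulk fixed-point saturation over the cell set; both are proved to return the same Bool everywhere.


-- ===== PORT A =====
-- the 4-neighborhood tuple ((cur[0]+1,cur[1]), (cur[0]-1,cur[1]), (cur[0],cur[1]+1), (cur[0],cur[1]-1))
def pvNbrs (c : Int × Int) : List (Int × Int) :=
  [(c.1 + 1, c.2), (c.1 - 1, c.2), (c.1, c.2 + 1), (c.1, c.2 - 1)]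

-- body of A's inner 'for nxt in …' loop: push to the queue and mark seen
def pvBFSstep (mask : List (Int × Int)) (st : List (Int × Int) × PySem.Set (Int × Int))
    (nxt : Int × Int) : List (Int × Int) × PySem.Set (Int × Int) :=
  if mask.contains nxt && !(PySem.Set.contains st.2 nxt) then
    (st.1 ++ [nxt], PySem.Set.add st.2 nxt)
  else st

-- A's 'while q' loop; the fuel only makes the recursion total (mask.length + q.length + 1 is
-- proved sufficient below, so the 'fuel = 0' branch is never reached on the actual call)
def pvBFS (mask : List (Int × Int)) (goalSet : PySem.Set (Int × Int)) :
    Nat → List (Int × Int) → PySem.Set (Int × Int) → Bool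
  | 0, _, _ => false
  | _ + 1, [], _ => false
  | fuel + 1, cur :: q, seen =>
    if PySem.Set.contains goalSet cur then true
    else
      let st := (pvNbrs cur).foldl (pvBFSstep mask) (q, seen)
      pvBFS mask goalSet fuel st.1 st.2

def segment_connected_py (mask : List (Int × Int)) (starts : List (Int × Int)) (goals : List (Int × Int)) : Bool :=
  if starts.isEmpty || goals.isEmpty || mask.isEmpty then false
  else
    let goalSet := PySem.Set.ofList goals
    let q := starts.filter (fun s => mask.contains s)
    if q.isEmpty then false
    else
      let seen := PySem.Set.ofList q
      pvBFS mask goalSet (mask.length + q.length + 1) q seen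

-- ===== PORT B =====
-- the comprehension {n for (x,y) in reach for n in nbrs if n in cells}
def pvNews (cells reach : PySem.Set (Int × Int)) : PySem.Set (Int × Int) :=
  reach.foldl
    (fun acc c =>
      (pvNbrs c).foldl
        (fun a n => if PySem.Set.contains cells n then PySem.Set.add a n else a) acc)
    PySem.Set.empty

-- one round of 'reach |= {…}'
def pvStepB (cells reach : PySem.Set (Int × Int)) : PySem.Set (Int × Int) :=
  PySem.Set.union reach (pvNews cells reach)

def segment_connected_py_alt (mask : List (Int × Int)) (starts : List (Int × Int)) (goals : List (Int × Int)) : Bool :=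
  let cells : PySem.Set (Int × Int) := PySem.Set.ofList mask
  let reach0 : PySem.Set (Int × Int) :=
    PySem.Set.ofList (starts.filter (fun s => PySem.Set.contains cells s))
  let final := (PySem.List.pyRange 0 (PySem.Set.len cells) 1).foldl (fun r _ => pvStepB cells r) reach0
  goals.any (fun g => PySem.Set.contains final g)

-- ===== PRECONDITION & SPEC =====
def Spec_segment_connected_py (mask : List (Int × Int)) (starts : List (Int × Int)) (goals : List (Int × Int)) (out : Bool) : Prop := out = segment_connected_py_alt mask starts goals
instance (mask : List (Int × Int)) (starts : List (Int × Int)) (goals : List (Int × Int)) (out : Bool) : Decidable (Spec_segment_connected_py mask starts goals out) := by unfold Spec_segment_connected_py; infer_instance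

-- ===== CLAIM (what is proved, stated in full; the proofs are below) =====
def Claim_equal_segment_connected_py : Prop := ∀ (mask : List (Int × Int)) (starts : List (Int × Int)) (goals : List (Int × Int)), Dom_segment_connected_py mask starts goals → Spec_segment_connected_py mask starts goals (segment_connected_py mask starts goals)

-- ===== LEMMAS AND PROOFS =====

-- the 4-adjacency step relation inside the mask, its reflexive-transitive closure,
-- and 'reachable from some start that lies in the mask' -- the common spec of both programs
def pvEdge (mask : List (Int × Int)) (a b : Int × Int) : Prop := b ∈ pvNbrs a ∧ b ∈ mask

def pvReach (mask : List (Int × Int)) : Int × Int → Int × Int → Prop :=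
  Relation.ReflTransGen (pvEdge mask)

def pvR (mask starts : List (Int × Int)) (c : Int × Int) : Prop :=
  ∃ s ∈ starts, s ∈ mask ∧ pvReach mask s c

lemma pvR_tail {mask starts : List (Int × Int)} {c d : Int × Int}
    (h : pvR mask starts c) (hn : d ∈ pvNbrs c) (hm : d ∈ mask) : pvR mask starts d := by
  obtain ⟨s, hs, hsm, hr⟩ := h
  exact ⟨s, hs, hsm, hr.tail ⟨hn, hm⟩⟩

-- any set containing the in-mask starts and closed under in-mask neighbors contains all of pvR
lemma pvR_subset_closed {mask starts : List (Int × Int)} {S : Int × Int → Prop}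
    (h0 : ∀ s ∈ starts, s ∈ mask → S s)
    (hc : ∀ c, S c → ∀ d ∈ pvNbrs c, d ∈ mask → S d) :
    ∀ c, pvR mask starts c → S c := by
  intro c hr
  obtain ⟨s, hs, hsm, hr⟩ := hr
  induction hr with
  | refl => exact h0 s hs hsm
  | tail _ e ih => exact hc _ ih _ e.1 e.2

lemma pvNodup_len_le {l m : List (Int × Int)} (h : l.Nodup) (hs : ∀ x ∈ l, x ∈ m) :
    l.length ≤ m.length := by
  calc l.length = l.toFinset.card := (List.toFinset_card_of_nodup h).symm
    _ ≤ m.toFinset.card := Finset.card_le_card (by intro x hx; simp only [List.mem_toFinset] at *; exact hs x hx)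
    _ ≤ m.length := List.toFinset_card_le m

-- ---- A side: the BFS returns true exactly on 'some goal is reachable' ----

lemma pvFold_spec (mask : List (Int × Int)) :
    ∀ (ns q : List (Int × Int)) (seen : PySem.Set (Int × Int)), seen.Nodup →
    ∃ Δ : List (Int × Int),
      (ns.foldl (pvBFSstep mask) (q, seen)) = (q ++ Δ, seen ++ Δ) ∧
      (seen ++ Δ).Nodup ∧
      (∀ d ∈ Δ, d ∈ ns ∧ d ∈ mask ∧ d ∉ seen) ∧
      (∀ d ∈ ns, d ∈ mask → d ∈ seen ++ Δ) := by
  intro ns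
  induction ns with
  | nil =>
    intro q seen hnd
    exact ⟨[], by simp, by simpa using hnd, by simp, by simp⟩
  | cons n t ih =>
    intro q seen hnd
    by_cases hacc : n ∈ mask ∧ n ∉ seen
    · have hstep : pvBFSstep mask (q, seen) n = (q ++ [n], seen ++ [n]) := by
        simp [pvBFSstep, PySem.Set.contains, hacc.1, hacc.2]
      have hnd' : (seen ++ [n]).Nodup := by
        refine List.Nodup.append hnd (List.nodup_singleton n) ?_
        intro a ha hb
        simp only [List.mem_singleton] at hb
        exact hacc.2 (hb ▸ ha)
      obtain ⟨Δ, h1, h2, h3, h4⟩ := ih (q ++ [n]) (seen ++ [n]) hnd'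
      refine ⟨n :: Δ, ?_, ?_, ?_, ?_⟩
      · rw [List.foldl_cons, hstep, h1]; simp [List.append_assoc]
      · simpa [List.append_assoc] using h2
      · intro d hd
        rcases List.mem_cons.mp hd with rfl | hd
        · exact ⟨by simp, hacc.1, hacc.2⟩
        · obtain ⟨hdt, hdm, hds⟩ := h3 d hd
          refine ⟨by simp [hdt], hdm, ?_⟩
          simp only [List.mem_append, List.mem_singleton] at hds
          exact fun h => hds (Or.inl h)
      · intro d hd hdm
        rcases List.mem_cons.mp hd with rfl | hd
        · simp
        · have := h4 d hd hdm
          simp only [List.mem_append, List.mem_cons] at this ⊢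
          tauto
    · have hstep : pvBFSstep mask (q, seen) n = (q, seen) := by
        by_cases hm : n ∈ mask
        · have hs : n ∈ seen := by tauto
          simp [pvBFSstep, PySem.Set.contains, hs]
        · simp [pvBFSstep, hm]
      obtain ⟨Δ, h1, h2, h3, h4⟩ := ih q seen hnd
      refine ⟨Δ, by rw [List.foldl_cons, hstep]; exact h1, h2, ?_, ?_⟩
      · intro d hd
        obtain ⟨a, b, c⟩ := h3 d hd
        exact ⟨by simp [a], b, c⟩
      · intro d hd hdm
        rcases List.mem_cons.mp hd with rfl | hd
        · have hs : d ∈ seen := by tauto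
          simp [hs]
        · exact h4 d hd hdm

lemma pvBFS_correct (mask starts goals : List (Int × Int)) :
    ∀ (fuel : Nat) (q : List (Int × Int)) (seen : PySem.Set (Int × Int)),
    seen.Nodup →
    (∀ c ∈ seen, c ∈ mask) →
    (∀ c ∈ seen, pvR mask starts c) →
    (∀ c ∈ q, c ∈ seen) →
    (∀ s ∈ starts, s ∈ mask → s ∈ seen) →
    (∀ c ∈ seen, c ∉ q → c ∉ goals ∧ ∀ d ∈ pvNbrs c, d ∈ mask → d ∈ seen) →
    q.length + (mask.length - seen.length) + 1 ≤ fuel →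
    (pvBFS mask (PySem.Set.ofList goals) fuel q seen = true ↔ ∃ g ∈ goals, pvR mask starts g) := by
  intro fuel
  induction fuel with
  | zero => intro q seen _ _ _ _ _ _ hf; omega
  | succ f ih =>
    intro q seen hnd hmask hR hqseen hstarts hproc hf
    cases q with
    | nil =>
      simp only [pvBFS]
      constructor
      · intro h; simp at h
      · rintro ⟨g, hgl, hgr⟩
        exfalso
        have hsub := pvR_subset_closed (S := fun c => c ∈ seen)
          (fun s hs hm => hstarts s hs hm)
          (fun c hc d hd hdm => (hproc c hc (by simp)).2 d hd hdm)
        exact (hproc g (hsub g hgr) (by simp)).1 hgl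
    | cons cur q =>
      by_cases hg : cur ∈ goals
      · have : PySem.Set.contains (PySem.Set.ofList goals) cur = true := by
          simp [PySem.Set.mem_ofList]; exact hg
        simp only [pvBFS, this, if_true, true_iff]
        exact ⟨cur, hg, hR cur (hqseen cur (by simp))⟩
      · have hgc : PySem.Set.contains (PySem.Set.ofList goals) cur = false := by
          simp only [Bool.eq_false_iff, ne_eq, PySem.Set.contains_iff, PySem.Set.mem_ofList]
          exact hg
        obtain ⟨Δ, h1, h2, h3, h4⟩ := pvFold_spec mask (pvNbrs cur) q seen hnd
        have hcur : cur ∈ seen := hqseen cur (by simp)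
        have hlen : (seen ++ Δ).length ≤ mask.length := by
          apply pvNodup_len_le h2
          intro x hx
          rcases List.mem_append.mp hx with hx | hx
          · exact hmask x hx
          · exact (h3 x hx).2.1
        simp only [pvBFS, hgc, Bool.false_eq_true, if_false, h1]
        apply ih
        · exact h2
        · intro c hc
          rcases List.mem_append.mp hc with hc | hc
          · exact hmask c hc
          · exact (h3 c hc).2.1
        · intro c hc
          rcases List.mem_append.mp hc with hc | hc
          · exact hR c hc
          · obtain ⟨hn, hm, _⟩ := h3 c hc
            exact pvR_tail (hR cur hcur) hn hm
        · intro c hc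
          rcases List.mem_append.mp hc with hc | hc
          · exact List.mem_append.mpr (Or.inl (hqseen c (by simp [hc])))
          · exact List.mem_append.mpr (Or.inr hc)
        · intro s hs hsm
          exact List.mem_append.mpr (Or.inl (hstarts s hs hsm))
        · intro c hc hcq
          have hcΔ : c ∉ Δ := fun h => hcq (List.mem_append.mpr (Or.inr h))
          have hcq' : c ∉ q := fun h => hcq (List.mem_append.mpr (Or.inl h))
          have hcs : c ∈ seen := by
            rcases List.mem_append.mp hc with h | h
            · exact h
            · exact absurd h hcΔ
          by_cases hccur : c = cur
          · subst hccur
            exact ⟨hg, fun d hd hdm => h4 d hd hdm⟩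
          · have := hproc c hcs (by simp [hcq', hccur])
            exact ⟨this.1, fun d hd hdm => List.mem_append.mpr (Or.inl (this.2 d hd hdm))⟩
        · have e1 : (q ++ Δ).length = q.length + Δ.length := by simp
          have e2 : (seen ++ Δ).length = seen.length + Δ.length := by simp
          simp only [List.length_cons] at hf
          omega

lemma pvA_iff (mask starts goals : List (Int × Int)) :
    segment_connected_py mask starts goals = true ↔ ∃ g ∈ goals, pvR mask starts g := by
  unfold segment_connected_py
  by_cases hge : starts.isEmpty || goals.isEmpty || mask.isEmpty
  · simp only [hge, if_true]
    constructor
    · intro h; simp at h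
    · rintro ⟨g, hgl, s, hs, hsm, _⟩
      exfalso
      simp only [Bool.or_eq_true, List.isEmpty_iff] at hge
      rcases hge with (h | h) | h
      · simp [h] at hs
      · simp [h] at hgl
      · simp [h] at hsm
  · simp only [hge, if_false, Bool.false_eq_true]
    set q0 := starts.filter (fun s => mask.contains s) with hq0
    have hmemq0 : ∀ x, x ∈ q0 ↔ x ∈ starts ∧ x ∈ mask := by
      intro x; simp [hq0, List.mem_filter]
    by_cases hqe : q0.isEmpty
    · simp only [hqe, if_true]
      constructor
      · intro h; simp at h
      · rintro ⟨g, hgl, s, hs, hsm, _⟩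
        exfalso
        rw [List.isEmpty_iff] at hqe
        have : s ∈ q0 := (hmemq0 s).mpr ⟨hs, hsm⟩
        simp [hqe] at this
    · simp only [hqe, if_false, Bool.false_eq_true]
      apply pvBFS_correct
      · exact PySem.Set.nodup_ofList q0
      · intro c hc
        exact ((hmemq0 c).mp ((PySem.Set.mem_ofList _ _).mp hc)).2
      · intro c hc
        obtain ⟨h1, h2⟩ := (hmemq0 c).mp ((PySem.Set.mem_ofList _ _).mp hc)
        exact ⟨c, h1, h2, Relation.ReflTransGen.refl⟩
      · intro c hc; exact (PySem.Set.mem_ofList _ _).mpr hc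
      · intro s hs hsm
        exact (PySem.Set.mem_ofList _ _).mpr ((hmemq0 s).mpr ⟨hs, hsm⟩)
      · intro c hc hcq
        exact absurd ((PySem.Set.mem_ofList _ _).mp hc) hcq
      · have : (PySem.Set.ofList q0).length ≤ mask.length := by
          apply pvNodup_len_le (PySem.Set.nodup_ofList q0)
          intro x hx
          exact ((hmemq0 x).mp ((PySem.Set.mem_ofList _ _).mp hx)).2
        omega

-- ---- B side: the saturation loop computes exactly the reachable set ----

lemma pvMem_inner (cells : PySem.Set (Int × Int)) :
    ∀ (ns : List (Int × Int)) (a : PySem.Set (Int × Int)) (x : Int × Int),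
    (x ∈ ns.foldl (fun a n => if PySem.Set.contains cells n then PySem.Set.add a n else a) a
      ↔ x ∈ a ∨ (x ∈ ns ∧ x ∈ cells)) := by
  intro ns
  induction ns with
  | nil => intro a x; simp
  | cons n t ih =>
    intro a x
    simp only [List.foldl_cons]
    by_cases hc : PySem.Set.contains cells n = true
    · rw [if_pos hc, ih]
      have hn : n ∈ cells := (PySem.Set.contains_iff _ _).mp hc
      simp only [PySem.Set.mem_add, List.mem_cons]
      constructor
      · rintro ((h | rfl) | ⟨h1, h2⟩)
        · exact Or.inl h
        · exact Or.inr ⟨Or.inl rfl, hn⟩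
        · exact Or.inr ⟨Or.inr h1, h2⟩
      · rintro (h | ⟨(rfl | h1), h2⟩)
        · exact Or.inl (Or.inl h)
        · exact Or.inl (Or.inr rfl)
        · exact Or.inr ⟨h1, h2⟩
    · rw [if_neg hc, ih]
      have hn : n ∉ cells := fun h => hc ((PySem.Set.contains_iff _ _).mpr h)
      simp only [List.mem_cons]
      constructor
      · rintro (h | ⟨h1, h2⟩)
        · exact Or.inl h
        · exact Or.inr ⟨Or.inr h1, h2⟩
      · rintro (h | ⟨(rfl | h1), h2⟩)
        · exact Or.inl h
        · exact absurd h2 hn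
        · exact Or.inr ⟨h1, h2⟩

lemma pvMem_news (cells : PySem.Set (Int × Int)) :
    ∀ (rl acc : List (Int × Int)) (x : Int × Int),
    (x ∈ rl.foldl
        (fun acc c => (pvNbrs c).foldl
          (fun a n => if PySem.Set.contains cells n then PySem.Set.add a n else a) acc) acc
      ↔ x ∈ acc ∨ ∃ c ∈ rl, x ∈ pvNbrs c ∧ x ∈ cells) := by
  intro rl
  induction rl with
  | nil => intro acc x; simp
  | cons r t ih =>
    intro acc x
    simp only [List.foldl_cons]
    rw [ih, pvMem_inner]
    simp only [List.mem_cons]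
    constructor
    · rintro ((h | ⟨h1, h2⟩) | ⟨c, hc, h1, h2⟩)
      · exact Or.inl h
      · exact Or.inr ⟨r, Or.inl rfl, h1, h2⟩
      · exact Or.inr ⟨c, Or.inr hc, h1, h2⟩
    · rintro (h | ⟨c, (rfl | hc), h1, h2⟩)
      · exact Or.inl (Or.inl h)
      · exact Or.inl (Or.inr ⟨h1, h2⟩)
      · exact Or.inr ⟨c, hc, h1, h2⟩

lemma pvMem_stepB (cells r : PySem.Set (Int × Int)) (x : Int × Int) :
    x ∈ pvStepB cells r ↔ x ∈ r ∨ ∃ c ∈ r, x ∈ pvNbrs c ∧ x ∈ cells := by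
  rw [pvStepB, PySem.Set.mem_union, pvNews, pvMem_news]
  simp [PySem.Set.empty]

lemma pvNodup_stepB (cells : PySem.Set (Int × Int)) {r : PySem.Set (Int × Int)} (h : r.Nodup) :
    (pvStepB cells r).Nodup := PySem.Set.nodup_union r _ h

lemma pvFoldl_add_append (t : List (Int × Int)) :
    ∀ s : PySem.Set (Int × Int), ∃ Δ, t.foldl PySem.Set.add s = s ++ Δ := by
  induction t with
  | nil => intro s; exact ⟨[], by simp⟩
  | cons x t ih =>
    intro s
    simp only [List.foldl_cons]
    by_cases hx : PySem.Set.contains s x = true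
    · obtain ⟨Δ, hΔ⟩ := ih s
      exact ⟨Δ, by rw [PySem.Set.add, if_pos hx]; exact hΔ⟩
    · obtain ⟨Δ, hΔ⟩ := ih (s ++ [x])
      refine ⟨x :: Δ, ?_⟩
      rw [PySem.Set.add, if_neg hx, hΔ, List.append_assoc]
      rfl

lemma pvStepB_append (cells r : PySem.Set (Int × Int)) :
    ∃ Δ, pvStepB cells r = r ++ Δ := pvFoldl_add_append _ r

lemma pvFoldl_ignore (F : PySem.Set (Int × Int) → PySem.Set (Int × Int)) :
    ∀ (l : List Int) (r : PySem.Set (Int × Int)), l.foldl (fun r _ => F r) r = F^[l.length] r := by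
  intro l
  induction l with
  | nil => intro r; rfl
  | cons x t ih =>
    intro r
    simp only [List.foldl_cons, List.length_cons, ih, Function.iterate_succ_apply]

lemma pvB_iff (mask starts goals : List (Int × Int)) :
    segment_connected_py_alt mask starts goals = true ↔ ∃ g ∈ goals, pvR mask starts g := by
  rw [show segment_connected_py_alt mask starts goals = goals.any (fun g =>
      PySem.Set.contains ((PySem.List.pyRange 0 (PySem.Set.len (PySem.Set.ofList mask)) 1).foldl
        (fun r _ => pvStepB (PySem.Set.ofList mask) r)
        (PySem.Set.ofList (starts.filter (fun s => PySem.Set.contains (PySem.Set.ofList mask) s)))) g)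
    from rfl]
  set cells : PySem.Set (Int × Int) := PySem.Set.ofList mask with hcells
  set r0 : PySem.Set (Int × Int) :=
    PySem.Set.ofList (starts.filter (fun s => PySem.Set.contains cells s)) with hr0
  set F : PySem.Set (Int × Int) → PySem.Set (Int × Int) := pvStepB cells with hF
  set N : Nat := cells.length with hN
  have hmemcells : ∀ x, x ∈ cells ↔ x ∈ mask := fun x => PySem.Set.mem_ofList mask x
  have hmemr0 : ∀ x, x ∈ r0 ↔ x ∈ starts ∧ x ∈ mask := by
    intro x
    rw [hr0, PySem.Set.mem_ofList, List.mem_filter]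
    simp [hmemcells]
  -- the loop is iteration of F
  have hlen : (PySem.List.pyRange 0 (PySem.Set.len cells) 1).length = N := by
    rw [PySem.List.length_pyRange_one]
    simp [PySem.Set.len, hN]
  rw [pvFoldl_ignore, hlen]
  -- soundness + structural invariants at every iterate
  have hinv : ∀ k, (F^[k] r0).Nodup ∧ ∀ x ∈ F^[k] r0, x ∈ cells ∧ pvR mask starts x := by
    intro k
    induction k with
    | zero =>
      refine ⟨PySem.Set.nodup_ofList _, ?_⟩
      intro x hx
      obtain ⟨h1, h2⟩ := (hmemr0 x).mp hx
      exact ⟨(hmemcells x).mpr h2, ⟨x, h1, h2, Relation.ReflTransGen.refl⟩⟩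
    | succ k ih =>
      rw [Function.iterate_succ_apply']
      refine ⟨pvNodup_stepB cells ih.1, ?_⟩
      intro x hx
      rcases (pvMem_stepB cells _ x).mp hx with hx | ⟨c, hc, h1, h2⟩
      · exact ih.2 x hx
      · exact ⟨h2, pvR_tail (ih.2 c hc).2 h1 ((hmemcells x).mp h2)⟩
  -- every iterate is bounded in size by N
  have hbound : ∀ k, (F^[k] r0).length ≤ N := by
    intro k
    exact pvNodup_len_le (hinv k).1 (fun x hx => ((hinv k).2 x hx).1)
  -- monotone: r0 ⊆ every iterate
  have hmono : ∀ k, ∀ x ∈ r0, x ∈ F^[k] r0 := by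
    intro k
    induction k with
    | zero => exact fun x hx => hx
    | succ k ih =>
      intro x hx
      rw [Function.iterate_succ_apply']
      exact (pvMem_stepB cells _ x).mpr (Or.inl (ih x hx))
  -- F^[N] r0 is a fixed point of F
  have hfixprop : ∀ (x : PySem.Set (Int × Int)), F x = x → ∀ j, F^[j] x = x := by
    intro x hx j
    induction j with
    | zero => rfl
    | succ j ih => rw [Function.iterate_succ_apply, hx, ih]
  have hfixed : F (F^[N] r0) = F^[N] r0 := by
    by_cases hex : ∃ k < N, F (F^[k] r0) = F^[k] r0
    · obtain ⟨k, hk, hfix⟩ := hex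
      have h1 : F^[N] r0 = F^[k] r0 := by
        have : F^[N] r0 = F^[N - k] (F^[k] r0) := by
          rw [← Function.iterate_add_apply]
          congr 1
          omega
        rw [this, hfixprop _ hfix]
      rw [h1, hfix]
    · push Not at hex
      have hgrow : ∀ k, k ≤ N → r0.length + k ≤ (F^[k] r0).length := by
        intro k
        induction k with
        | zero => intro _; simp
        | succ k ih =>
          intro hk
          have hne := hex k (by omega)
          obtain ⟨Δ, hΔ⟩ := pvStepB_append cells (F^[k] r0)
          have hΔne : Δ ≠ [] := by
            intro h; rw [h, List.append_nil] at hΔ; exact hne hΔ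
          have : (F^[k] r0).length + 1 ≤ (F (F^[k] r0)).length := by
            rw [show F (F^[k] r0) = pvStepB cells (F^[k] r0) from rfl, hΔ, List.length_append]
            have := List.length_pos_of_ne_nil hΔne
            omega
          rw [Function.iterate_succ_apply']
          have := ih (by omega)
          omega
      have h1 := hgrow N le_rfl
      have h2 := hbound N
      have hr0e : r0 = [] := by
        have : r0.length = 0 := by omega
        exact List.length_eq_zero_iff.mp this
      have hFnil : F ([] : PySem.Set (Int × Int)) = [] := rfl
      rw [hr0e, hfixprop _ hFnil, hFnil]
  -- the final set is exactly pvR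
  have hchar : ∀ x, x ∈ F^[N] r0 ↔ pvR mask starts x := by
    intro x
    constructor
    · intro hx; exact ((hinv N).2 x hx).2
    · intro hx
      refine pvR_subset_closed (S := fun c => c ∈ F^[N] r0) ?_ ?_ x hx
      · intro s hs hsm
        exact hmono N s ((hmemr0 s).mpr ⟨hs, hsm⟩)
      · intro c hc d hd hdm
        rw [← hfixed]
        exact (pvMem_stepB cells _ d).mpr (Or.inr ⟨c, hc, hd, (hmemcells d).mpr hdm⟩)
  rw [List.any_eq_true]
  constructor
  · rintro ⟨g, hg, hcg⟩
    exact ⟨g, hg, (hchar g).mp ((PySem.Set.contains_iff _ _).mp hcg)⟩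
  · rintro ⟨g, hg, hr⟩
    exact ⟨g, hg, (PySem.Set.contains_iff _ _).mpr ((hchar g).mpr hr)⟩

-- ===== VERDICT (by name: the statement is the Claim_ definition above) =====
theorem segment_connected_py_spec : Claim_equal_segment_connected_py := by
  intro mask starts goals _
  unfold Spec_segment_connected_py
  rw [Bool.eq_iff_iff, pvA_iff, pvB_iff]
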